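-- pv_equiv track=rewrite | github.com/The-Folium/Mathcraft | compiler.py | get_innermost_curly_braces_indices
-- ===== SOURCE A (Python) =====
-- def get_innermost_curly_braces_indices(line: str):
--     """Функція знаходить індекси найбільш вкладених лівої і правої фігурної дужки в рядку"""
--     current_depth = max_depth = 0
--     start, stop = None, None
--     parentheses_are_open = False
--
--     for index, symbol in enumerate(line):
--         if symbol == "{":
--             current_depth += 1
--             if current_depth > max_depth:
--                 parentheses_are_open = True
--                 max_depth = current_depth
--                 start = index
--         elif symbol == "}":
--             if current_depth == max_depth and parentheses_are_open:
--                 parentheses_are_open = False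
--                 stop = index
--             current_depth -= 1
--         if current_depth < 0:
--             raise SyntaxError(f"Invalid curly braces sequence in line: {line}")
--     if current_depth != 0:
--         raise SyntaxError(f"Invalid curly braces sequence in line: {line}")
--     return start, stop
-- ===== SOURCE B (Python) =====
-- def get_innermost_curly_braces_indices(line: str):
--     """Staged passes instead of a one-pass recording state machine: build the whole
--     depth profile, take its maximum, then locate the first '{' that reaches that
--     maximum and the first '}' after it (which necessarily closes it)."""
--     depths = []
--     d = 0
--     for symbol in line:
--         if symbol == "{":
--             d += 1
--         elif symbol == "}":
--             d -= 1
--         if d < 0: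
--             raise SyntaxError(f"Invalid curly braces sequence in line: {line}")
--         depths.append(d)
--     if d != 0:
--         raise SyntaxError(f"Invalid curly braces sequence in line: {line}")
--     m = max(depths, default=0)
--     if m == 0:
--         return None, None
--     start = next(i for i, symbol in enumerate(line) if symbol == "{" and depths[i] == m)
--     stop = next(i for i in range(start + 1, len(line)) if line[i] == "}")
--     return start, stop
-- ===== Notes on version B (the rewrite author's own statement) =====
-- stated objective: alternative
-- what changed: Replaces A's single forward pass that records the answer on the fly in a state machine (depth counter, running max, 'open' flag, start set at a new-max '{' and stop set later at its '}') by staged passes with no recording state: first build the whole depth profile of the line, then take its maximum m, then find the first '{' whose profile value is m and the first '}' after it, which necessarily closes it.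
import Mathlib
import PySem

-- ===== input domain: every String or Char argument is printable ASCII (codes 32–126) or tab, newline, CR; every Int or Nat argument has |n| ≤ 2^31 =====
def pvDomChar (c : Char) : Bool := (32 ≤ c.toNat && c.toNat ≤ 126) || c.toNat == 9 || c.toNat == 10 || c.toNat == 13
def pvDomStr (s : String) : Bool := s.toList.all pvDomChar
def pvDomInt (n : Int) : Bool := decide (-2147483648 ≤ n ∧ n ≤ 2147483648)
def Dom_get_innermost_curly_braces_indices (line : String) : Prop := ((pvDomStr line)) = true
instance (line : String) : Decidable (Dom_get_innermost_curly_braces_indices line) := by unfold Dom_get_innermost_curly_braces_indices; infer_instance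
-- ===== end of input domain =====

-- B replaces A's single recording pass (depth counter + running max + 'open' flag, start written at a
-- new-max '{' and stop written later at its '}') by staged passes: build the whole depth profile,
-- take its maximum m, then search for the first '{' at profile value m and the first '}' after it.
-- Same cost (alternative decomposition, not claimed faster).

-- ===== PORT A =====
-- loop state of A: current_depth, max_depth, start, stop, parentheses_are_open, and an error flag
-- (err = true models that the Python has raised SyntaxError; the loop is frozen from then on and the
-- port returns (none, none), which Pre_ excludes).
structure PvStA where
  d : Int
  m : Int
  st : Option Int
  sp : Option Int
  op : Bool
  err : Bool
deriving Repr, DecidableEq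

def pvStepA (s : PvStA) (p : Int × Char) : PvStA :=
  if s.err then s else
  let s1 :=
    if p.2 = '{' then
      let d := s.d + 1
      if d > s.m then { s with d := d, m := d, op := true, st := some p.1 }
      else { s with d := d }
    else if p.2 = '}' then
      let s' := if s.d = s.m ∧ s.op = true then { s with op := false, sp := some p.1 } else s
      { s' with d := s'.d - 1 }
    else s
  if s1.d < 0 then { s1 with err := true } else s1

def get_innermost_curly_braces_indices (line : String) : Option Int × Option Int :=
  let fin := (PySem.List.enumerate line.toList).foldl pvStepA ⟨0, 0, none, none, false, false⟩
  if fin.err = true ∨ fin.d ≠ 0 then (none, none) else (fin.st, fin.sp)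

-- ===== PORT B =====
-- the depth update of pass 1 ('if symbol == "{": d += 1 elif symbol == "}": d -= 1')
def pvStepD (d : Int) (c : Char) : Int :=
  if c = '{' then d + 1 else if c = '}' then d - 1 else d

-- pass 1: the depth profile (depths[i] = nesting depth after reading line[i]);
-- none models the SyntaxError raised inside the loop on a negative prefix depth.
def pvDepths : List Char → Int → Option (List Int × Int)
  | [], d => some ([], d)
  | c :: rest, d =>
    if pvStepD d c < 0 then none
    else match pvDepths rest (pvStepD d c) with
      | none => none
      | some (l, df) => some (pvStepD d c :: l, df)

-- pass 3: 'next(i for i, symbol in enumerate(line) if symbol == "{" and depths[i] == m)' —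
-- the characters paired with their profile values, scanned left to right with a counter;
-- none models StopIteration (unreachable under Pre_, where a maximum m ≥ 1 is attained at a '{').
def pvFindStart : List (Char × Int) → Int → Int → Option Int
  | [], _, _ => none
  | (c, dep) :: rest, m, i => if c = '{' ∧ dep = m then some i else pvFindStart rest m (i + 1)

-- pass 4: 'next(i for i in range(start + 1, len(line)) if line[i] == "}")'; none = StopIteration.
def pvFindStop : List Char → Int → Option Int
  | [], _ => none
  | c :: rest, i => if c = '}' then some i else pvFindStop rest (i + 1)

def get_innermost_curly_braces_indices_alt (line : String) : Option Int × Option Int :=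
  match pvDepths line.toList 0 with
  | none => (none, none)            -- SyntaxError (negative prefix depth)
  | some (depths, d) =>
    if d ≠ 0 then (none, none)      -- SyntaxError (unclosed '{')
    else
      -- max(depths, default=0)
      let m := PySem.List.maxD depths (fun x => x) 0
      if m = 0 then (none, none)
      else
        match pvFindStart (line.toList.zip depths) m 0 with
        | none => (none, none)
        | some s =>
          match pvFindStop (line.toList.drop (s.toNat + 1)) (s + 1) with
          | none => (none, none)
          | some t => (some s, some t)

-- ===== PRECONDITION & SPEC =====
-- Pre_ = balanced curly braces: on any other line the Python A raises SyntaxError (and so does B).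
def Pre_get_innermost_curly_braces_indices (line : String) : Prop :=
  line.toList.count '}' = line.toList.count '{' ∧
  ∀ n ∈ List.range (line.toList.length + 1),
    (line.toList.take n).count '}' ≤ (line.toList.take n).count '{'
instance (line : String) : Decidable (Pre_get_innermost_curly_braces_indices line) := by
  unfold Pre_get_innermost_curly_braces_indices; infer_instance

def pvWitness_get_innermost_curly_braces_indices : String := "a{b{c}d}"

def Spec_get_innermost_curly_braces_indices (line : String) (out : Option Int × Option Int) : Prop := out = get_innermost_curly_braces_indices_alt line
instance (line : String) (out : Option Int × Option Int) : Decidable (Spec_get_innermost_curly_braces_indices line out) := by unfold Spec_get_innermost_curly_braces_indices; infer_instance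

-- ===== CLAIM (what is proved, stated in full; the proofs are below) =====
def Claim_equal_get_innermost_curly_braces_indices : Prop := ∀ (line : String), Dom_get_innermost_curly_braces_indices line → Pre_get_innermost_curly_braces_indices line → Spec_get_innermost_curly_braces_indices line (get_innermost_curly_braces_indices line)

-- ===== LEMMAS AND PROOFS =====

-- ---- facts about pvDepths ----
lemma pvDepths_append_singleton (l : List Char) (c : Char) (d : Int) :
    pvDepths (l ++ [c]) d =
      match pvDepths l d with
      | none => none
      | some (P, df) =>
        if pvStepD df c < 0 then none else some (P ++ [pvStepD df c], pvStepD df c) := by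
  induction l generalizing d with
  | nil =>
    rfl
  | cons x xs ih =>
    simp only [List.cons_append, pvDepths]
    by_cases h : pvStepD d x < 0
    · simp [h]
    · simp only [h, if_false, ih]
      rcases hx : pvDepths xs (pvStepD d x) with _ | ⟨P, df⟩
      · simp
      · simp only
        split_ifs <;> simp

lemma pvDepths_nonneg (l : List Char) (d : Int) (P : List Int) (df : Int)
    (h : pvDepths l d = some (P, df)) : ∀ x ∈ P, 0 ≤ x := by
  induction l generalizing d P df with
  | nil =>
    simp only [pvDepths, Option.some.injEq, Prod.mk.injEq] at h
    simp [← h.1]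
  | cons c rest ih =>
    simp only [pvDepths] at h
    split_ifs at h with hneg
    rcases hx : pvDepths rest (pvStepD d c) with _ | ⟨P', df'⟩ <;> rw [hx] at h
    · simp at h
    · simp only [Option.some.injEq, Prod.mk.injEq] at h
      obtain ⟨h1, h2⟩ := h
      rw [← h1]
      intro x hx'
      rcases List.mem_cons.mp hx' with h | h
      · omega
      · exact ih _ _ _ hx x h

lemma pvDepths_prefix (l1 l2 : List Char) (d : Int) (p : List Int × Int)
    (h : pvDepths (l1 ++ l2) d = some p) : ∃ q, pvDepths l1 d = some q := by
  induction l1 generalizing d p with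
  | nil => exact ⟨([], d), rfl⟩
  | cons c rest ih =>
    simp only [List.cons_append, pvDepths] at h ⊢
    split_ifs at h with hneg
    rcases hx : pvDepths (rest ++ l2) (pvStepD d c) with _ | q'
    · rw [hx] at h; simp at h
    · obtain ⟨⟨P', df'⟩, hq⟩ := ih _ _ hx
      exact ⟨(pvStepD d c :: P', df'), by simp [hneg, hq]⟩

-- Pre_ (prefix counts stay nonnegative) forces pass 1 to succeed, with final depth = the count difference.
lemma pvDepths_of_counts (l : List Char) (d : Int)
    (h : ∀ k ≤ l.length, 0 ≤ d + ((l.take k).count '{' : Int) - ((l.take k).count '}' : Int)) :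
    ∃ P, pvDepths l d = some (P, d + (l.count '{' : Int) - (l.count '}' : Int)) := by
  induction l generalizing d with
  | nil => exact ⟨[], by simp [pvDepths]⟩
  | cons c rest ih =>
    have h1 := h 1 (by simp)
    simp [List.count_cons] at h1
    have hd' : 0 ≤ pvStepD d c := by
      by_cases hc1 : c = '{' <;> by_cases hc2 : c = '}' <;>
        simp [pvStepD, hc1, hc2] at h1 ⊢ <;> omega
    obtain ⟨P, hP⟩ := ih (pvStepD d c) (by
      intro k hk
      have := h (k + 1) (by simpa using hk)
      simp [List.take_succ_cons, List.count_cons] at this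
      by_cases hc1 : c = '{' <;> by_cases hc2 : c = '}' <;>
        simp [pvStepD, hc1, hc2] at this ⊢ <;> omega)
    refine ⟨pvStepD d c :: P, ?_⟩
    simp only [pvDepths, not_lt.mpr hd', if_false]
    rw [hP]
    have : pvStepD d c + ((rest.count '{' : Nat) : Int) - ((rest.count '}' : Nat) : Int)
        = d + (((c :: rest).count '{' : Nat) : Int) - (((c :: rest).count '}' : Nat) : Int) := by
      by_cases hc1 : c = '{' <;> by_cases hc2 : c = '}' <;>
        simp [pvStepD, hc1, hc2, List.count_cons] <;> push_cast <;> omega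
    rw [this]

-- ---- facts about the two searches ----
lemma pvFindStart_append (l1 l2 : List (Char × Int)) (m i : Int) :
    pvFindStart (l1 ++ l2) m i =
      match pvFindStart l1 m i with
      | some s => some s
      | none => pvFindStart l2 m (i + l1.length) := by
  induction l1 generalizing i with
  | nil => simp [pvFindStart]
  | cons p rest ih =>
    obtain ⟨c, dep⟩ := p
    simp only [List.cons_append, pvFindStart]
    split_ifs with h
    · rfl
    · rw [ih]
      rcases pvFindStart rest m (i + 1) with _ | s <;> simp only
      congr 1
      simp only [List.length_cons]
      push_cast
      omega

lemma pvFindStart_none (l : List (Char × Int)) (m i : Int)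
    (h : ∀ p ∈ l, ¬(p.1 = '{' ∧ p.2 = m)) : pvFindStart l m i = none := by
  induction l generalizing i with
  | nil => rfl
  | cons p rest ih =>
    obtain ⟨c, dep⟩ := p
    have hp := h (c, dep) (by simp)
    simp only [pvFindStart, if_neg hp]
    exact ih (i + 1) (fun q hq => h q (by simp [hq]))

lemma pvFindStop_append (l1 l2 : List Char) (i : Int) :
    pvFindStop (l1 ++ l2) i =
      match pvFindStop l1 i with
      | some s => some s
      | none => pvFindStop l2 (i + l1.length) := by
  induction l1 generalizing i with
  | nil => simp [pvFindStop]
  | cons c rest ih =>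
    simp only [List.cons_append, pvFindStop]
    split_ifs with h
    · rfl
    · rw [ih]
      rcases pvFindStop rest (i + 1) with _ | s <;> simp only
      congr 1
      simp only [List.length_cons]
      push_cast
      omega

-- ---- max(depths, default=0) is the running max when the profile is nonnegative ----
lemma pvMaxAux (t : List Int) (a : Int) :
    PySem.List.max? (a :: t) (fun x => x) = some (t.foldl max a) := by
  induction t generalizing a with
  | nil => rfl
  | cons x rest ih =>
    have h2 : (if a < x then (some x : Option Int) else some a) = some (max a x) := by
      split_ifs <;> simp <;> omega
    have hih := ih (max a x)
    simp only [PySem.List.max?, List.foldl_cons] at hih ⊢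
    simpa [h2] using hih

lemma pvMaxD_eq_foldl (P : List Int) (h : ∀ x ∈ P, 0 ≤ x) :
    PySem.List.maxD P (fun x => x) 0 = P.foldl max 0 := by
  cases P with
  | nil => rfl
  | cons y t =>
    have hy : 0 ≤ y := h y (by simp)
    simp only [PySem.List.maxD, pvMaxAux, Option.getD_some, List.foldl_cons]
    congr 1
    omega

-- ---- the coupling invariant: A's loop state after the prefix 'pre', in terms of B's passes ----
def pvInv (pre : List Char) (a : PvStA) : Prop :=
  ∃ P : List Int, pvDepths pre 0 = some (P, a.d) ∧ P.length = pre.length ∧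
    a.err = false ∧ 0 ≤ a.d ∧ a.d ≤ a.m ∧ a.m = P.foldl max 0 ∧
    ( (a.m = 0 ∧ a.st = none ∧ a.sp = none ∧ a.op = false) ∨
      (0 < a.m ∧ ∃ s : Int, a.st = some s ∧ 0 ≤ s ∧ s.toNat < pre.length ∧
        pvFindStart (pre.zip P) a.m 0 = some s ∧
        ( (a.op = true ∧ a.d = a.m ∧ pvFindStop (pre.drop (s.toNat + 1)) (s + 1) = none) ∨
          (a.op = false ∧ ∃ t : Int, a.sp = some t ∧
             pvFindStop (pre.drop (s.toNat + 1)) (s + 1) = some t))))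

-- evaluation lemmas for A's step
lemma pvStepA_open_new (a : PvStA) (i : Int) (hae : a.err = false) (hd : 0 ≤ a.d)
    (hgt : a.d + 1 > a.m) :
    pvStepA a (i, '{') = { a with d := a.d + 1, m := a.d + 1, op := true, st := some i } := by
  simp [pvStepA, hae]
  split_ifs with hA hB <;> first | rfl | (exfalso; omega) | (exfalso; simp at hB; omega) | (exfalso; simp_all; omega)

lemma pvStepA_open_old (a : PvStA) (i : Int) (hae : a.err = false) (hd : 0 ≤ a.d)
    (hgt : ¬(a.d + 1 > a.m)) :
    pvStepA a (i, '{') = { a with d := a.d + 1 } := by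
  simp [pvStepA, hae]
  split_ifs with hA hB <;> first | rfl | (exfalso; omega) | (exfalso; simp at hB; omega) | (exfalso; simp_all; omega)

lemma pvStepA_close_rec (a : PvStA) (i : Int) (hae : a.err = false) (hd : 1 ≤ a.d)
    (h1 : a.d = a.m) (h2 : a.op = true) :
    pvStepA a (i, '}') = { a with d := a.d - 1, op := false, sp := some i } := by
  simp [pvStepA, hae]
  split_ifs with hA hB <;> first | exact absurd ⟨h1, h2⟩ hA | rfl | (exfalso; omega) | (exfalso; simp at hB; omega) | (exfalso; simp_all; omega)

lemma pvStepA_close_norec (a : PvStA) (i : Int) (hae : a.err = false) (hd : 1 ≤ a.d)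
    (hcond : ¬(a.d = a.m ∧ a.op = true)) :
    pvStepA a (i, '}') = { a with d := a.d - 1 } := by
  simp [pvStepA, hae]
  split_ifs with hA hB <;> first | exact absurd hA hcond | rfl | (exfalso; omega) | (exfalso; simp at hB; omega) | (simp_all)

lemma pvStepA_other (a : PvStA) (i : Int) (c : Char) (hae : a.err = false) (h1 : c ≠ '{')
    (h2 : c ≠ '}') (hd : 0 ≤ a.d) : pvStepA a (i, c) = a := by
  simp [pvStepA, hae, h1, h2]
  intro hlt
  exact absurd hlt (by omega)

-- helper: the appended profile entry
lemma pvDepths_snoc (pre : List Char) (c : Char) (P : List Int) (d0 : Int)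
    (hP : pvDepths pre 0 = some (P, d0)) (hd' : ¬ pvStepD d0 c < 0) :
    pvDepths (pre ++ [c]) 0 = some (P ++ [pvStepD d0 c], pvStepD d0 c) := by
  rw [pvDepths_append_singleton, hP]
  simp [hd']

-- the invariant survives one character
lemma pvInv_step (pre : List Char) (c : Char) (a : PvStA) (q : List Int × Int)
    (hsucc : pvDepths (pre ++ [c]) 0 = some q) (hInv : pvInv pre a) :
    pvInv (pre ++ [c]) (pvStepA a ((pre.length : Int), c)) := by
  obtain ⟨P, hP, hlen, hae, hd0, hdm, hm, hdisj⟩ := hInv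
  have hd' : ¬ pvStepD a.d c < 0 := by
    intro hneg
    rw [pvDepths_append_singleton, hP] at hsucc
    simp [hneg] at hsucc
  have happ := pvDepths_snoc pre c P a.d hP hd'
  have hmax : (P ++ [pvStepD a.d c]).foldl max 0 = max (P.foldl max 0) (pvStepD a.d c) := by
    rw [List.foldl_append]; rfl
  have hzip : (pre ++ [c]).zip (P ++ [pvStepD a.d c]) = pre.zip P ++ [(c, pvStepD a.d c)] :=
    List.zip_append hlen.symm
  have hziplen : (pre.zip P).length = pre.length := by
    rw [List.length_zip, hlen, min_self]
  have hPle : ∀ x ∈ P, x ≤ P.foldl max 0 := (PySem.List.le_foldl_max P 0).2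
  by_cases hc1 : c = '{'
  · subst hc1
    have hstep : pvStepD a.d '{' = a.d + 1 := by simp [pvStepD]
    rw [hstep] at hd' happ hmax hzip
    by_cases hgt : a.d + 1 > a.m
    · -- a new maximum: A records start := here, open := true
      rw [pvStepA_open_new a _ hae hd0 hgt]
      unfold pvInv
      dsimp only
      refine ⟨P ++ [a.d + 1], happ, by simp [hlen], hae, by omega, le_refl _,
        by rw [hmax, ← hm]; omega, Or.inr ?_⟩
      refine ⟨by omega, (pre.length : Int), rfl, by positivity, by simp, ?_, Or.inl ?_⟩
      · rw [hzip, pvFindStart_append, pvFindStart_none (pre.zip P) _ 0 ?hnone]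
        · simp [pvFindStart, hziplen]
        case hnone =>
          intro p hp hcontra
          have h2 := (List.of_mem_zip hp).2
          have h3 := hPle p.2 h2
          rw [← hm] at h3
          omega
      · refine ⟨rfl, rfl, ?_⟩
        have hnil : (pre ++ ['{']).drop (((pre.length : Int)).toNat + 1) = [] := by
          apply List.drop_eq_nil_of_le
          simp
        rw [hnil]
        rfl
    · -- not a new maximum: only the depth counter moves
      rw [pvStepA_open_old a _ hae hd0 hgt]
      unfold pvInv
      dsimp only
      rcases hdisj with ⟨hm0, _, _, _⟩ | ⟨hmpos, s, hst, hs0, hsl, hfs, hbr⟩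
      · omega
      · rcases hbr with ⟨hop, hdm2, _⟩ | ⟨hop, t, hsp, hstop⟩
        · omega
        refine ⟨P ++ [a.d + 1], happ, by simp [hlen], hae, by omega, by omega,
          by rw [hmax, ← hm]; omega,
          Or.inr ⟨hmpos, s, hst, hs0,
            by simp only [List.length_append, List.length_cons, List.length_nil]; omega, ?_,
            Or.inr ⟨hop, t, hsp, ?_⟩⟩⟩
        · rw [hzip, pvFindStart_append, hfs]
        · have hdrop : (pre ++ ['{']).drop (s.toNat + 1) = pre.drop (s.toNat + 1) ++ ['{'] :=
            List.drop_append_of_le_length (by omega)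
          rw [hdrop, pvFindStop_append, hstop]
  · by_cases hc2 : c = '}'
    · subst hc2
      have hstep : pvStepD a.d '}' = a.d - 1 := by simp [pvStepD]
      rw [hstep] at hd' happ hmax hzip
      have hd1 : 1 ≤ a.d := by omega
      rcases hdisj with ⟨hm0, _, _, _⟩ | ⟨hmpos, s, hst, hs0, hsl, hfs, hbr⟩
      · omega
      have hdrop : (pre ++ ['}']).drop (s.toNat + 1) = pre.drop (s.toNat + 1) ++ ['}'] :=
        List.drop_append_of_le_length (by omega)
      rcases hbr with ⟨hop, hdm2, hstopnone⟩ | ⟨hop, t, hsp, hstop⟩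
      · -- the deepest pair closes here: A records stop := here
        rw [pvStepA_close_rec a _ hae hd1 hdm2 hop]
        unfold pvInv
        dsimp only
        refine ⟨P ++ [a.d - 1], happ, by simp [hlen], hae, by omega, by omega,
          by rw [hmax, ← hm]; omega,
          Or.inr ⟨hmpos, s, hst, hs0,
            by simp only [List.length_append, List.length_cons, List.length_nil]; omega, ?_,
            Or.inr ⟨rfl, (pre.length : Int), rfl, ?_⟩⟩⟩
        · rw [hzip, pvFindStart_append, hfs]
        · rw [hdrop, pvFindStop_append, hstopnone]
          simp only [pvFindStop, if_pos rfl]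
          rw [List.length_drop]
          push_cast [Nat.cast_sub (by omega : s.toNat + 1 ≤ pre.length)]
          have h9 := Int.toNat_of_nonneg hs0
          simp only [Option.some.injEq]
          omega
      · -- not the deepest pair: only the depth counter moves
        rw [pvStepA_close_norec a _ hae hd1 (by simp [hop])]
        unfold pvInv
        dsimp only
        refine ⟨P ++ [a.d - 1], happ, by simp [hlen], hae, by omega, by omega,
          by rw [hmax, ← hm]; omega,
          Or.inr ⟨hmpos, s, hst, hs0,
            by simp only [List.length_append, List.length_cons, List.length_nil]; omega, ?_,
            Or.inr ⟨hop, t, hsp, ?_⟩⟩⟩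
        · rw [hzip, pvFindStart_append, hfs]
        · rw [hdrop, pvFindStop_append, hstop]
    · -- any other character changes nothing
      have hstep : pvStepD a.d c = a.d := by simp [pvStepD, hc1, hc2]
      rw [hstep] at hd' happ hmax hzip
      rw [pvStepA_other a _ c hae hc1 hc2 hd0]
      unfold pvInv
      have hmax' : (P ++ [a.d]).foldl max 0 = a.m := by
        rw [hmax, ← hm]
        omega
      rcases hdisj with ⟨hm0, hst, hsp, hop⟩ | ⟨hmpos, s, hst, hs0, hsl, hfs, hbr⟩
      · exact ⟨P ++ [a.d], happ, by simp [hlen], hae, hd0, hdm, hmax'.symm,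
          Or.inl ⟨hm0, hst, hsp, hop⟩⟩
      · have hdrop : (pre ++ [c]).drop (s.toNat + 1) = pre.drop (s.toNat + 1) ++ [c] :=
          List.drop_append_of_le_length (by omega)
        refine ⟨P ++ [a.d], happ, by simp [hlen], hae, hd0, hdm, hmax'.symm,
          Or.inr ⟨hmpos, s, hst, hs0,
            by simp only [List.length_append, List.length_cons, List.length_nil]; omega, ?_, ?_⟩⟩
        · rw [hzip, pvFindStart_append, hfs]
        · rcases hbr with ⟨hop, hdm2, hstopnone⟩ | ⟨hop, t, hsp, hstop⟩
          · refine Or.inl ⟨hop, hdm2, ?_⟩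
            rw [hdrop, pvFindStop_append, hstopnone]
            simp [pvFindStop, hc2]
          · refine Or.inr ⟨hop, t, hsp, ?_⟩
            rw [hdrop, pvFindStop_append, hstop]

-- folding A's loop over a suffix preserves the invariant
lemma pvInv_fold (suf pre : List Char) (a : PvStA) (q : List Int × Int)
    (hsucc : pvDepths (pre ++ suf) 0 = some q) (hInv : pvInv pre a) :
    pvInv (pre ++ suf) ((PySem.List.enumerate suf (pre.length : Int)).foldl pvStepA a) := by
  induction suf generalizing pre a q with
  | nil => simpa using hInv
  | cons c rest ih =>
    rw [PySem.List.enumerate_cons]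
    simp only [List.foldl_cons]
    have hsplit : pre ++ c :: rest = (pre ++ [c]) ++ rest := by simp
    obtain ⟨q1, hq1⟩ := pvDepths_prefix (pre ++ [c]) rest 0 q (by rwa [← hsplit])
    have hstep := pvInv_step pre c a q1 hq1 hInv
    have := ih (pre ++ [c]) (pvStepA a ((pre.length : Int), c)) q (by rwa [← hsplit]) hstep
    rw [hsplit]
    simpa using this

-- A's port equals B's port on every balanced line
lemma pv_ports_eq (line : String) (hpre : Pre_get_innermost_curly_braces_indices line) :
    get_innermost_curly_braces_indices line = get_innermost_curly_braces_indices_alt line := by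
  obtain ⟨hbal, hpref⟩ := hpre
  have hcnt : ∀ k ≤ line.toList.length,
      0 ≤ (0:Int) + ((line.toList.take k).count '{' : Int) - ((line.toList.take k).count '}' : Int) := by
    intro k hk
    have := hpref k (List.mem_range.mpr (by omega))
    push_cast
    omega
  obtain ⟨P, hP⟩ := pvDepths_of_counts line.toList 0 hcnt
  have hfin : (0:Int) + (line.toList.count '{' : Int) - (line.toList.count '}' : Int) = 0 := by
    rw [hbal]
    push_cast
    omega
  rw [hfin] at hP
  have h0 : pvInv ([] : List Char) ⟨0, 0, none, none, false, false⟩ :=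
    ⟨[], rfl, rfl, rfl, le_refl _, le_refl _, rfl, Or.inl ⟨rfl, rfl, rfl, rfl⟩⟩
  have hfold := pvInv_fold line.toList [] ⟨0, 0, none, none, false, false⟩ (P, 0)
    (by simpa using hP) h0
  simp only [List.nil_append, List.length_nil, Nat.cast_zero] at hfold
  obtain ⟨P', hP', hlen', hae, hd0, hdm, hm, hdisj⟩ := hfold
  set fa := (PySem.List.enumerate line.toList 0).foldl pvStepA ⟨0, 0, none, none, false, false⟩ with hfa
  have hPP : P' = P ∧ fa.d = 0 := by
    rw [hP] at hP'
    simpa [eq_comm] using hP'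
  obtain ⟨hPeq, hfd⟩ := hPP
  subst hPeq
  have hAval : get_innermost_curly_braces_indices line = (fa.st, fa.sp) := by
    unfold get_innermost_curly_braces_indices
    rw [← hfa]
    simp [hae, hfd]
  have hmaxd : PySem.List.maxD P' (fun x => x) 0 = P'.foldl max 0 :=
    pvMaxD_eq_foldl P' (pvDepths_nonneg line.toList 0 P' 0 hP)
  rw [hAval]
  unfold get_innermost_curly_braces_indices_alt
  rw [hP]
  dsimp only
  rw [if_neg (by simp), hmaxd]
  by_cases hm0 : P'.foldl max 0 = 0
  · rcases hdisj with ⟨_, hst, hsp, _⟩ | ⟨hmpos, _⟩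
    · rw [if_pos hm0, hst, hsp]
    · rw [← hm] at hm0; omega
  · rcases hdisj with ⟨hmz, _, _, _⟩ | ⟨hmpos, s, hst, hs0, hsl, hfs, hbr⟩
    · rw [hm] at hmz; exact absurd hmz hm0
    rcases hbr with ⟨hop, hdm2, _⟩ | ⟨hop, t, hsp, hstop⟩
    · omega
    rw [if_neg hm0, ← hm, hfs]
    dsimp only
    rw [hstop]
    dsimp only
    rw [hst, hsp]

-- ===== VERDICT (by name: the statement is the Claim_ definition above) =====
theorem get_innermost_curly_braces_indices_spec : Claim_equal_get_innermost_curly_braces_indices := by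
  intro line _ hpre
  unfold Spec_get_innermost_curly_braces_indices
  exact pv_ports_eq line hpre
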